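-- pv_equiv track=rewrite | github.com/HsiehYenTse/CV2018Fall | hw7/yokoi_connectivity_num_v2.py | PairRelationship
-- ===== SOURCE A (Python) =====
-- def PairRelationship(IBmap):
--     height = len(IBmap)
--     width = len(IBmap[0])
--     #ans = [['']*width]*height
--     ans = []
--     for i, row in enumerate(range(height)):   #scan every pixel
--         ans.append([])
--         for col in range(width):
--             a = 'q'
--             if IBmap[row][col] == 'b':
--                 if row-1 >= 0:
--                     if IBmap[row-1][col] == 'i':
--                         a = 'p'
--                 if col-1 >= 0:
--                     if IBmap[row][col-1] == 'i':
--                         a = 'p'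
--                 if row+1 < height:
--                      if IBmap[row+1][col] == 'i':
--                         a = 'p'
--                 if col+1 < width:
--                     if IBmap[row][col+1] == 'i':
--                         a = 'p'
--             ans[i].append(a)
--     return ans
-- ===== SOURCE B (Python) =====
-- def PairRelationship(IBmap):
--     height = len(IBmap)
--     width = len(IBmap[0])
--     ans = [['q'] * width for _ in range(height)]
--     for r in range(height):
--         for c in range(width):
--             if IBmap[r][c] == 'i':
--                 if r > 0 and IBmap[r - 1][c] == 'b':
--                     ans[r - 1][c] = 'p'
--                 if c > 0 and IBmap[r][c - 1] == 'b':
--                     ans[r][c - 1] = 'p'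
--                 if r + 1 < height and IBmap[r + 1][c] == 'b':
--                     ans[r + 1][c] = 'p'
--                 if c + 1 < width and IBmap[r][c + 1] == 'b':
--                     ans[r][c + 1] = 'p'
--     return ans
-- ===== Notes on version B (the rewrite author's own statement) =====
-- stated objective: alternative
-- what changed: Replaces A's gather (each border pixel tests its four neighbors for an interior one) with a scatter: B allocates a full grid of 'q' and every interior pixel marks its in-bounds border neighbors 'p' in place, exploiting the symmetry of adjacency.
-- outside the precondition, e.g. on PairRelationship([]): A raises IndexError, B raises IndexError; on PairRelationship([['b', 'i'], ['q']]): A raises IndexError, B raises IndexError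
import Mathlib
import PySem

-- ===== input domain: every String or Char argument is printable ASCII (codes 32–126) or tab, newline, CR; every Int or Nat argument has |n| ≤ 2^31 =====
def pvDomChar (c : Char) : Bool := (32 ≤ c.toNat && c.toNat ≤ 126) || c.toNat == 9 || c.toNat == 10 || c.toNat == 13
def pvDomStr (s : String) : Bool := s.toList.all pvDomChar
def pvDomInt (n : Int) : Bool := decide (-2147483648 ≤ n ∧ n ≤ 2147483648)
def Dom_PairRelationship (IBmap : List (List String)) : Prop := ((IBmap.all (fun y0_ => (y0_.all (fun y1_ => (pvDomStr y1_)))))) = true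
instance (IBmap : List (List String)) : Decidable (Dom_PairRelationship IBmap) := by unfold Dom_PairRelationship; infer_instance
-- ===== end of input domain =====

-- B replaces A's gather ("does this border pixel have an interior neighbour?") by a scatter:
-- it allocates a full grid of 'q' and every interior pixel marks its in-bounds 'b'
-- neighbours 'p' in place (objective: alternative decomposition, same asymptotic cost).

-- shared indexing helper: IBmap[r][c] for 0 ≤ r, c (both Pythons index identically)
def pvAt (m : List (List String)) (r c : Nat) : String := (m.getD r []).getD c ""

-- ===== PORT A =====
-- A's 'a = "q"; four conditional a = "p" assignments' is transcribed as the equivalent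
-- nested if-chain (last assignment checked outermost).
def PairRelationship (IBmap : List (List String)) : List (List String) :=
  (List.range IBmap.length).foldl (fun ans row =>
    ans ++ [(List.range (IBmap.getD 0 []).length).foldl (fun racc col =>
      racc ++ [
        if pvAt IBmap row col = "b" then
          if col + 1 < (IBmap.getD 0 []).length ∧ pvAt IBmap row (col + 1) = "i" then "p"
          else if row + 1 < IBmap.length ∧ pvAt IBmap (row + 1) col = "i" then "p"
          else if 1 ≤ col ∧ pvAt IBmap row (col - 1) = "i" then "p"
          else if 1 ≤ row ∧ pvAt IBmap (row - 1) col = "i" then "p"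
          else "q"
        else "q"]) []]) []

-- ===== PORT B =====
-- ans[r][c] = 'p'  (in-place write on the scatter grid)
def pvMark (g : List (List String)) (r c : Nat) : List (List String) :=
  g.set r ((g.getD r []).set c "p")

-- 'if cond: ans[r][c] = "p"'
def pvCondMark (cond : Prop) [Decidable cond] (g : List (List String)) (r c : Nat) :
    List (List String) :=
  if cond then pvMark g r c else g

-- body of B's doubly-nested loop for one pixel rc (the four conditional writes, in
-- B's order: up, left, down, right; innermost application first)
def pvStep (M : List (List String)) (h w : Nat) (ans : List (List String)) (rc : Nat × Nat) :
    List (List String) :=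
  if pvAt M rc.1 rc.2 = "i" then
    pvCondMark (rc.2 + 1 < w ∧ pvAt M rc.1 (rc.2 + 1) = "b")
      (pvCondMark (rc.1 + 1 < h ∧ pvAt M (rc.1 + 1) rc.2 = "b")
        (pvCondMark (1 ≤ rc.2 ∧ pvAt M rc.1 (rc.2 - 1) = "b")
          (pvCondMark (1 ≤ rc.1 ∧ pvAt M (rc.1 - 1) rc.2 = "b") ans (rc.1 - 1) rc.2)
          rc.1 (rc.2 - 1))
        (rc.1 + 1) rc.2)
      rc.1 (rc.2 + 1)
  else ans

def PairRelationship_alt (IBmap : List (List String)) : List (List String) :=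
  ((List.range IBmap.length).flatMap
      (fun r => (List.range (IBmap.getD 0 []).length).map (fun c => (r, c)))).foldl
    (pvStep IBmap IBmap.length (IBmap.getD 0 []).length)
    (List.replicate IBmap.length (List.replicate (IBmap.getD 0 []).length "q"))

-- ===== PRECONDITION & SPEC =====
-- Pre_ excludes exactly the inputs where the Python A raises IndexError: the empty map
-- (len(IBmap[0])) and maps in which some row is shorter than the first row (IBmap[row][col]).
def Pre_PairRelationship (IBmap : List (List String)) : Prop :=
  IBmap ≠ [] ∧ ∀ row ∈ IBmap, (IBmap.headD []).length ≤ row.length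
instance (IBmap : List (List String)) : Decidable (Pre_PairRelationship IBmap) := by
  unfold Pre_PairRelationship; infer_instance
def pvWitness_PairRelationship : List (List String) := [["b", "i"], ["i", "q"]]

def Spec_PairRelationship (IBmap : List (List String)) (out : List (List String)) : Prop := out = PairRelationship_alt IBmap
instance (IBmap : List (List String)) (out : List (List String)) : Decidable (Spec_PairRelationship IBmap out) := by unfold Spec_PairRelationship; infer_instance

-- ===== CLAIM (what is proved, stated in full; the proofs are below) =====
def Claim_equal_PairRelationship : Prop := ∀ (IBmap : List (List String)), Dom_PairRelationship IBmap → Pre_PairRelationship IBmap → Spec_PairRelationship IBmap (PairRelationship IBmap)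

-- ===== LEMMAS AND PROOFS =====

-- the common pointwise grid both ports are reduced to
def pvGridOf (h w : Nat) (F : Nat → Nat → String) : List (List String) :=
  (List.range h).map fun r => (List.range w).map fun c => F r c

-- "interior pixel p marks cell (R,C)" — i at p, b at (R,C), (R,C) a 4-neighbour of p
def pvTrig (M : List (List String)) (p : Nat × Nat) (R C : Nat) : Bool :=
  decide (pvAt M p.1 p.2 = "i" ∧ pvAt M R C = "b" ∧
    ((R + 1 = p.1 ∧ C = p.2) ∨ (R = p.1 + 1 ∧ C = p.2) ∨
     (R = p.1 ∧ C + 1 = p.2) ∨ (R = p.1 ∧ C = p.2 + 1)))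

lemma pvGridOf_congr {h w : Nat} {F G : Nat → Nat → String}
    (H : ∀ R < h, ∀ C < w, F R C = G R C) : pvGridOf h w F = pvGridOf h w G := by
  unfold pvGridOf
  refine List.map_congr_left fun r hr => List.map_congr_left fun c hc => ?_
  exact H r (List.mem_range.mp hr) c (List.mem_range.mp hc)

lemma pvGridOf_mark {h w : Nat} {F : Nat → Nat → String} {r c : Nat}
    (hr : r < h) (hc : c < w) :
    pvMark (pvGridOf h w F) r c =
      pvGridOf h w (fun R C => if R = r ∧ C = c then "p" else F R C) := by
  have hget : (pvGridOf h w F).getD r [] = (List.range w).map fun c => F r c := by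
    unfold pvGridOf
    rw [List.getD_eq_getElem _ _ (by simpa using hr)]
    simp
  unfold pvMark
  rw [hget]
  unfold pvGridOf
  refine List.ext_getElem (by simp) ?_
  intro i h1 h2
  simp only [List.length_set, List.length_map, List.length_range] at h1
  simp only [List.getElem_set, List.getElem_map, List.getElem_range]
  by_cases hri : r = i
  · subst hri
    rw [if_pos rfl]
    refine List.ext_getElem (by simp) ?_
    intro j j1 j2
    simp only [List.length_set, List.length_map, List.length_range] at j1
    simp only [List.getElem_set, List.getElem_map, List.getElem_range]
    by_cases hcj : c = j
    · subst hcj; simp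
    · rw [if_neg hcj, if_neg (fun hx => hcj hx.2.symm)]
  · rw [if_neg hri]
    refine List.map_congr_left fun x hx => ?_
    rw [if_neg (fun hx2 => hri hx2.1.symm)]

lemma pvCondMark_gridOf {h w : Nat} {F : Nat → Nat → String} (cond : Prop) [Decidable cond]
    {r c : Nat} (hr : cond → r < h) (hc : cond → c < w) :
    pvCondMark cond (pvGridOf h w F) r c =
      pvGridOf h w (fun R C => if cond ∧ R = r ∧ C = c then "p" else F R C) := by
  unfold pvCondMark
  by_cases hcnd : cond
  · rw [if_pos hcnd, pvGridOf_mark (hr hcnd) (hc hcnd)]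
    exact pvGridOf_congr fun R _ C _ => by simp [hcnd]
  · rw [if_neg hcnd]
    exact pvGridOf_congr fun R _ C _ => by simp [hcnd]

-- a chain of four conditional 'p'-writes equals one disjunctive test
lemma pvChain4 {c1 c2 c3 c4 e : Prop} [Decidable c1] [Decidable c2] [Decidable c3]
    [Decidable c4] [Decidable e] (base : String) (hkey : e ↔ c1 ∨ c2 ∨ c3 ∨ c4) :
    (if c4 then "p" else if c3 then "p" else if c2 then "p" else if c1 then "p" else base) =
      if e then "p" else base := by
  split_ifs <;> first | rfl | (exfalso; tauto)

lemma pvStep_gridOf (M : List (List String)) {h w : Nat} (F : Nat → Nat → String)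
    {p : Nat × Nat} (hp1 : p.1 < h) (hp2 : p.2 < w) :
    pvStep M h w (pvGridOf h w F) p =
      pvGridOf h w (fun R C => if pvTrig M p R C then "p" else F R C) := by
  obtain ⟨pr, pc⟩ := p
  simp only at hp1 hp2
  unfold pvStep
  by_cases hi : pvAt M (pr, pc).1 (pr, pc).2 = "i"
  · rw [if_pos hi]
    simp only at hi
    rw [pvCondMark_gridOf (1 ≤ pr ∧ pvAt M (pr - 1) pc = "b") (fun _ => by omega) (fun _ => hp2)]
    rw [pvCondMark_gridOf (1 ≤ pc ∧ pvAt M pr (pc - 1) = "b") (fun _ => hp1) (fun _ => by omega)]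
    rw [pvCondMark_gridOf (pr + 1 < h ∧ pvAt M (pr + 1) pc = "b") (fun hx => hx.1) (fun _ => hp2)]
    rw [pvCondMark_gridOf (pc + 1 < w ∧ pvAt M pr (pc + 1) = "b") (fun _ => hp1) (fun hx => hx.1)]
    refine pvGridOf_congr fun R hR C hC => ?_
    refine pvChain4 (F R C) ?_
    simp only [pvTrig, decide_eq_true_eq]
    constructor
    · rintro ⟨-, htb, hadj | hadj | hadj | hadj⟩
      · -- interior below: pr = R + 1, target was (pr - 1, pc) = (R, C)
        have e1 : R + 1 = pr := hadj.1
        have e2 : C = pc := hadj.2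
        refine Or.inl ⟨⟨by omega, ?_⟩, by omega, by omega⟩
        have e3 : pr - 1 = R := by omega
        rw [e3, ← e2]; exact htb
      · -- interior above: R = pr + 1, target was (pr + 1, pc) = (R, C)
        have e1 : R = pr + 1 := hadj.1
        have e2 : C = pc := hadj.2
        refine Or.inr (Or.inr (Or.inl ⟨⟨by omega, ?_⟩, e1, e2⟩))
        rw [← e1, ← e2]; exact htb
      · -- interior to the right: pc = C + 1, target was (pr, pc - 1) = (R, C)
        have e1 : R = pr := hadj.1
        have e2 : C + 1 = pc := hadj.2
        refine Or.inr (Or.inl ⟨⟨by omega, ?_⟩, e1, by omega⟩)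
        have e3 : pc - 1 = C := by omega
        rw [← e1, e3]; exact htb
      · -- interior to the left: C = pc + 1, target was (pr, pc + 1) = (R, C)
        have e1 : R = pr := hadj.1
        have e2 : C = pc + 1 := hadj.2
        refine Or.inr (Or.inr (Or.inr ⟨⟨by omega, ?_⟩, e1, e2⟩))
        rw [← e1, ← e2]; exact htb
    · rintro (⟨⟨g1, g2⟩, gR, gC⟩ | ⟨⟨g1, g2⟩, gR, gC⟩ | ⟨⟨g1, g2⟩, gR, gC⟩ | ⟨⟨g1, g2⟩, gR, gC⟩)
      · subst gR; subst gC
        exact ⟨hi, g2, Or.inl ⟨by omega, rfl⟩⟩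
      · subst gR; subst gC
        exact ⟨hi, g2, Or.inr (Or.inr (Or.inl ⟨rfl, by omega⟩))⟩
      · subst gR; subst gC
        exact ⟨hi, g2, Or.inr (Or.inl ⟨rfl, rfl⟩)⟩
      · subst gR; subst gC
        exact ⟨hi, g2, Or.inr (Or.inr (Or.inr ⟨rfl, rfl⟩))⟩
  · rw [if_neg hi]
    simp only at hi
    exact (pvGridOf_congr fun R hR C hC => by simp [pvTrig, hi]).symm

lemma pvFoldl_step (M : List (List String)) {h w : Nat}
    (pix : List (Nat × Nat)) (hp : ∀ p ∈ pix, p.1 < h ∧ p.2 < w) (F : Nat → Nat → String) :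
    pix.foldl (pvStep M h w) (pvGridOf h w F) =
      pvGridOf h w (fun R C => if ∃ p ∈ pix, pvTrig M p R C then "p" else F R C) := by
  induction pix generalizing F with
  | nil => exact (pvGridOf_congr fun R _ C _ => by simp).symm
  | cons q t ih =>
    have hq := hp q (List.mem_cons_self ..)
    rw [List.foldl_cons, pvStep_gridOf M F hq.1 hq.2,
        ih (fun p hp' => hp p (List.mem_cons_of_mem _ hp'))]
    refine pvGridOf_congr fun R _ C _ => ?_
    simp only [List.mem_cons, exists_eq_or_imp]
    by_cases h2 : pvTrig M q R C
    · by_cases h1 : ∃ x ∈ t, pvTrig M x R C <;> simp [h1, h2]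
    · by_cases h1 : ∃ x ∈ t, pvTrig M x R C <;> simp [h1, h2]

lemma pvFoldl_append {α β : Type} (f : α → β) (l : List α) (l0 : List β) :
    l.foldl (fun acc x => acc ++ [f x]) l0 = l0 ++ l.map f := by
  induction l generalizing l0 with
  | nil => simp
  | cons x t ih => simp [ih]

lemma pvReplicate_gridOf (h w : Nat) :
    List.replicate h (List.replicate w "q") = pvGridOf h w (fun _ _ => "q") := by
  symm
  rw [List.eq_replicate_iff]
  refine ⟨by simp [pvGridOf], fun b hb => ?_⟩
  unfold pvGridOf at hb
  rcases List.mem_map.mp hb with ⟨r, -, rfl⟩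
  rw [List.eq_replicate_iff]
  exact ⟨by simp, fun s hs => by rcases List.mem_map.mp hs with ⟨c, -, rfl⟩; rfl⟩

-- per-cell agreement of A's gather formula with B's scatter condition
lemma pvCell_agree (M : List (List String)) {h w R C : Nat} (hR : R < h) (hC : C < w) :
    (if pvAt M R C = "b" then
       if C + 1 < w ∧ pvAt M R (C + 1) = "i" then "p"
       else if R + 1 < h ∧ pvAt M (R + 1) C = "i" then "p"
       else if 1 ≤ C ∧ pvAt M R (C - 1) = "i" then "p"
       else if 1 ≤ R ∧ pvAt M (R - 1) C = "i" then "p"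
       else "q"
     else "q") =
    (if ∃ p ∈ (List.range h).flatMap (fun r => (List.range w).map (fun c => (r, c))),
        pvTrig M p R C then "p" else ("q" : String)) := by
  by_cases hb : pvAt M R C = "b"
  · rw [if_pos hb]
    refine pvChain4 "q" ?_
    constructor
    · rintro ⟨p, hpmem, htrig⟩
      simp only [List.mem_flatMap, List.mem_map, List.mem_range] at hpmem
      rcases hpmem with ⟨pr, hr, pc, hc, rfl⟩
      simp only [pvTrig, decide_eq_true_eq] at htrig
      rcases htrig with ⟨hti0, -, hadj | hadj | hadj | hadj⟩
      all_goals have hti : pvAt M pr pc = "i" := hti0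
      · -- pr = R + 1 : A's down test (c3)
        have e1 : R + 1 = pr := hadj.1
        have e2 : C = pc := hadj.2
        refine Or.inr (Or.inr (Or.inl ⟨by omega, ?_⟩))
        rw [e1, e2]; exact hti
      · -- R = pr + 1 : A's up test (c1)
        have e1 : R = pr + 1 := hadj.1
        have e2 : C = pc := hadj.2
        refine Or.inl ⟨by omega, ?_⟩
        have e3 : R - 1 = pr := by omega
        rw [e3, e2]; exact hti
      · -- pc = C + 1 : A's right test (c4)
        have e1 : R = pr := hadj.1
        have e2 : C + 1 = pc := hadj.2
        refine Or.inr (Or.inr (Or.inr ⟨by omega, ?_⟩))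
        rw [e1, e2]; exact hti
      · -- C = pc + 1 : A's left test (c2)
        have e1 : R = pr := hadj.1
        have e2 : C = pc + 1 := hadj.2
        refine Or.inr (Or.inl ⟨by omega, ?_⟩)
        have e3 : C - 1 = pc := by omega
        rw [e1, e3]; exact hti
    · intro hd
      rcases hd with ⟨h1, h2⟩ | ⟨h1, h2⟩ | ⟨h1, h2⟩ | ⟨h1, h2⟩
      · refine ⟨(R - 1, C), ?_, decide_eq_true ⟨h2, hb, Or.inr (Or.inl ⟨by omega, rfl⟩)⟩⟩
        simp only [List.mem_flatMap, List.mem_map, List.mem_range]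
        exact ⟨R - 1, by omega, C, hC, rfl⟩
      · refine ⟨(R, C - 1), ?_, decide_eq_true ⟨h2, hb, Or.inr (Or.inr (Or.inr ⟨rfl, by omega⟩))⟩⟩
        simp only [List.mem_flatMap, List.mem_map, List.mem_range]
        exact ⟨R, hR, C - 1, by omega, rfl⟩
      · refine ⟨(R + 1, C), ?_, decide_eq_true ⟨h2, hb, Or.inl ⟨rfl, rfl⟩⟩⟩
        simp only [List.mem_flatMap, List.mem_map, List.mem_range]
        exact ⟨R + 1, h1, C, hC, rfl⟩
      · refine ⟨(R, C + 1), ?_, decide_eq_true ⟨h2, hb, Or.inr (Or.inr (Or.inl ⟨rfl, rfl⟩))⟩⟩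
        simp only [List.mem_flatMap, List.mem_map, List.mem_range]
        exact ⟨R, hR, C + 1, h1, rfl⟩
  · rw [if_neg hb]
    have hne : ¬ ∃ p ∈ (List.range h).flatMap (fun r => (List.range w).map (fun c => (r, c))),
        pvTrig M p R C := by
      rintro ⟨p, -, ht⟩
      simp only [pvTrig, decide_eq_true_eq] at ht
      exact hb ht.2.1
    rw [if_neg hne]

-- ===== VERDICT (by name: the statement is the Claim_ definition above) =====
theorem PairRelationship_spec : Claim_equal_PairRelationship := by
  intro M _ _
  unfold Spec_PairRelationship PairRelationship PairRelationship_alt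
  rw [pvReplicate_gridOf,
      pvFoldl_step M _ (by
        intro p hp
        simp only [List.mem_flatMap, List.mem_map, List.mem_range] at hp
        rcases hp with ⟨r, hr, c, hc, rfl⟩
        exact ⟨hr, hc⟩)]
  rw [pvFoldl_append, List.nil_append]
  unfold pvGridOf
  refine List.map_congr_left fun r hr => ?_
  rw [pvFoldl_append, List.nil_append]
  refine List.map_congr_left fun c hc => ?_
  exact pvCell_agree M (List.mem_range.mp hr) (List.mem_range.mp hc)
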